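-- pv_equiv track=rewrite | github.com/FrankieeW/QuadraticNumberFields | scripts/generate_api_catalog.py | extract_module_summary
-- ===== SOURCE A (Python) =====
-- def extract_module_summary(lines: list[str]) -> str:
--     inside = False
--     block: list[str] = []
--     for line in lines:
--         stripped = line.strip()
--         if stripped.startswith("/-!"):
--             inside = True
--             if stripped not in {"/-!", "/-! ", "/-!#"}:
--                 block.append(stripped[3:].strip())
--             continue
--         if inside and stripped == "-/":
--             break
--         if inside:
--             block.append(stripped)
--     prose: list[str] = []
--     for line in block:
--         if not line or line.startswith("#") or line.startswith("*"):
--             if prose: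
--                 break
--             continue
--         prose.append(line)
--     summary = " ".join(prose).strip()
--     return summary or "Source module in the quadratic number fields development."
-- ===== SOURCE B (Python) =====
-- def extract_module_summary(lines: list[str]) -> str:
--     # Single fused pass: a three-mode state machine (0 = before the doc block,
--     # 1 = inside it with no prose yet, 2 = collecting prose) that accumulates
--     # the prose directly, with no intermediate block list.
--     mode = 0
--     prose: list[str] = []
--     for line in lines:
--         s = line.strip()
--         if s.startswith("/-!"):
--             if mode == 0:
--                 mode = 1
--             if s in ("/-!", "/-! ", "/-!#"):
--                 continue
--             p = s[3:].strip()
--         elif mode == 0: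
--             continue
--         elif s == "-/":
--             break
--         else:
--             p = s
--         if not p or p.startswith(("#", "*")):
--             if mode == 2:
--                 break
--             continue
--         prose.append(p)
--         mode = 2
--     summary = " ".join(prose).strip()
--     return summary or "Source module in the quadratic number fields development."
-- ===== Notes on version B (the rewrite author's own statement) =====
-- stated objective: alternative
-- what changed: Fuses A's two staged loops (build a block list, then re-scan it for prose) into one pass: a three-mode state machine (before block / inside without prose / collecting prose) that accumulates the prose directly and never materialises the intermediate block list.
import Mathlib
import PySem

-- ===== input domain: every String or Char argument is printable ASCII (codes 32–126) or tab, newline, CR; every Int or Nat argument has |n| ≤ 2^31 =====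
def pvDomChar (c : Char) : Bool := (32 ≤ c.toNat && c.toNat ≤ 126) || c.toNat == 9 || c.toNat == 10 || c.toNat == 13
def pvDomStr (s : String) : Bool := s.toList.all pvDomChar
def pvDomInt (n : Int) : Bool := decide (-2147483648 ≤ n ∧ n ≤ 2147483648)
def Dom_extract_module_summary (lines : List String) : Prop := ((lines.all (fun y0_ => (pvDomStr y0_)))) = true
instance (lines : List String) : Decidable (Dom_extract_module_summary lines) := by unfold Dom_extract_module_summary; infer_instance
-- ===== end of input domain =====

-- B fuses A's two staged loops into one three-mode pass that accumulates the prose directly,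
-- with no intermediate block list (objective: alternative, same cost).

-- ===== PORT A =====
-- first loop of A: state (inside, block); 'break' on "-/" returns the accumulator
def pvLoopA : List String → Bool → List String → List String
  | [], _, block => block
  | l :: rest, inside, block =>
    let s := PySem.Str.strip l
    if PySem.Str.startswith s "/-!" then
      pvLoopA rest true
        (if !(s == "/-!" || s == "/-! " || s == "/-!#") then
          block ++ [PySem.Str.strip (PySem.Str.slice s (some 3) none)]
        else block)
    else if inside && s == "-/" then block
    else if inside then pvLoopA rest inside (block ++ [s])
    else pvLoopA rest inside block

-- second loop of A over the block, accumulating prose with break/continue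
def pvProseA : List String → List String → List String
  | [], prose => prose
  | l :: rest, prose =>
    if l == "" || PySem.Str.startswith l "#" || PySem.Str.startswith l "*" then
      if prose ≠ [] then prose else pvProseA rest prose
    else pvProseA rest (prose ++ [l])

def extract_module_summary (lines : List String) : String :=
  let block := pvLoopA lines false []
  let prose := pvProseA block []
  let summary := PySem.Str.strip (PySem.Str.join " " prose)
  if summary == "" then "Source module in the quadratic number fields development." else summary

-- ===== PORT B =====
-- B's single loop: mode 0 = before the doc block, 1 = inside with no prose yet, 2 = collecting.
-- The loop's shared tail (feed a candidate piece p through the prose rule) is written out in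
-- each of the two branches that reach it; 'break' returns the prose accumulator.
def pvGoB (ls : List String) (mode : Nat) (prose : List String) : List String :=
  match ls with
  | [] => prose
  | l :: rest =>
    let s := PySem.Str.strip l
    if PySem.Str.startswith s "/-!" then
      let mode1 := if mode == 0 then 1 else mode
      if s == "/-!" || s == "/-! " || s == "/-!#" then pvGoB rest mode1 prose
      else
        let p := PySem.Str.strip (PySem.Str.slice s (some 3) none)
        if p == "" || PySem.Str.startswith p "#" || PySem.Str.startswith p "*" then
          if mode1 == 2 then prose else pvGoB rest mode1 prose
        else pvGoB rest 2 (prose ++ [p])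
    else if mode == 0 then pvGoB rest 0 prose
    else if s == "-/" then prose
    else
      let p := s
      if p == "" || PySem.Str.startswith p "#" || PySem.Str.startswith p "*" then
        if mode == 2 then prose else pvGoB rest mode prose
      else pvGoB rest 2 (prose ++ [p])

def extract_module_summary_alt (lines : List String) : String :=
  let prose := pvGoB lines 0 []
  let summary := PySem.Str.strip (PySem.Str.join " " prose)
  if summary == "" then "Source module in the quadratic number fields development." else summary

-- ===== PRECONDITION & SPEC =====
def Spec_extract_module_summary (lines : List String) (out : String) : Prop := out = extract_module_summary_alt lines
instance (lines : List String) (out : String) : Decidable (Spec_extract_module_summary lines out) := by unfold Spec_extract_module_summary; infer_instance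

-- ===== CLAIM (what is proved, stated in full; the proofs are below) =====
def Claim_equal_extract_module_summary : Prop := ∀ (lines : List String), Dom_extract_module_summary lines → Spec_extract_module_summary lines (extract_module_summary lines)

-- ===== LEMMAS AND PROOFS =====

-- canonical form of A's first loop after the opener (proof helper only)
def pvC : List String → List String
  | [] => []
  | l :: rest =>
    let s := PySem.Str.strip l
    if PySem.Str.startswith s "/-!" then
      (if !(s == "/-!" || s == "/-! " || s == "/-!#") then
        [PySem.Str.strip (PySem.Str.slice s (some 3) none)]
      else []) ++ pvC rest
    else if s == "-/" then []
    else s :: pvC rest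

def pvBoring (s : String) : Bool :=
  s == "" || PySem.Str.startswith s "#" || PySem.Str.startswith s "*"

lemma pvLoopA_true (ls : List String) : ∀ acc,
    pvLoopA ls true acc = acc ++ pvC ls := by
  induction ls with
  | nil => intro acc; simp [pvLoopA, pvC]
  | cons l rest ih =>
    intro acc
    simp only [pvLoopA, pvC]
    cases h1 : PySem.Str.startswith (PySem.Str.strip l) "/-!" with
    | true =>
      simp only [h1, if_true]
      cases h2 : (PySem.Str.strip l == "/-!" || PySem.Str.strip l == "/-! " || PySem.Str.strip l == "/-!#") <;>
        simp [h1, h2, ih]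
    | false =>
      simp only [h1, Bool.false_eq_true, if_false]
      cases h2 : (PySem.Str.strip l == "-/") <;> simp [h1, h2, ih]

lemma pvProseA_ne (bl : List String) : ∀ p, p ≠ [] →
    pvProseA bl p = p ++ bl.takeWhile (fun s => !pvBoring s) := by
  induction bl with
  | nil => intro p _; simp [pvProseA]
  | cons l rest ih =>
    intro p hp
    simp only [pvProseA]
    cases h1 : (l == "" || PySem.Str.startswith l "#" || PySem.Str.startswith l "*") with
    | true =>
      have hb : pvBoring l = true := h1
      simp only [h1, if_true]
      rw [if_pos hp, List.takeWhile_cons_of_neg (by simp [hb]), List.append_nil]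
    | false =>
      have hb : pvBoring l = false := h1
      simp only [h1, Bool.false_eq_true, if_false]
      rw [List.takeWhile_cons_of_pos (by simp [hb]), ih (p ++ [l]) (by simp)]
      simp

-- mode 2: B returns the accumulated prose plus the interesting prefix of the remaining block
lemma pvGoB_two (ls : List String) : ∀ prose,
    pvGoB ls 2 prose = prose ++ (pvC ls).takeWhile (fun s => !pvBoring s) := by
  induction ls with
  | nil => intro prose; simp [pvGoB, pvC]
  | cons l rest ih =>
    intro prose
    simp only [pvGoB, pvC]
    cases h1 : PySem.Str.startswith (PySem.Str.strip l) "/-!" with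
    | true =>
      simp only [h1, if_true]
      cases h2 : (PySem.Str.strip l == "/-!" || PySem.Str.strip l == "/-! " || PySem.Str.strip l == "/-!#") with
      | true => simp [h2, ih]
      | false =>
        simp only [h2, Bool.false_eq_true, if_false, Bool.not_false, if_true, List.singleton_append]
        generalize PySem.Str.strip (PySem.Str.slice (PySem.Str.strip l) (some 3) none) = P
        cases h3 : (P == "" || PySem.Str.startswith P "#" || PySem.Str.startswith P "*") with
        | true =>
          simp only [h3, if_true]
          rw [List.takeWhile_cons_of_neg (by simp [show pvBoring P = true from h3])]
          simp
        | false =>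
          simp only [h3, Bool.false_eq_true, if_false]
          rw [List.takeWhile_cons_of_pos (by simp [show pvBoring P = false from h3])]
          simp [ih]
    | false =>
      simp only [h1, Bool.false_eq_true, if_false]
      cases h2 : (PySem.Str.strip l == "-/") with
      | true => simp [h2]
      | false =>
        simp only [h2, Bool.false_eq_true, if_false]
        generalize PySem.Str.strip l = P
        cases h3 : (P == "" || PySem.Str.startswith P "#" || PySem.Str.startswith P "*") with
        | true =>
          simp only [h3, if_true]
          rw [List.takeWhile_cons_of_neg (by simp [show pvBoring P = true from h3])]
          simp
        | false =>
          simp only [h3, Bool.false_eq_true, if_false]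
          rw [List.takeWhile_cons_of_pos (by simp [show pvBoring P = false from h3])]
          simp [ih]

-- mode 1: B computes A's second pass over the canonical block
lemma pvGoB_one (ls : List String) :
    pvGoB ls 1 [] = pvProseA (pvC ls) [] := by
  induction ls with
  | nil => simp [pvGoB, pvC, pvProseA]
  | cons l rest ih =>
    simp only [pvGoB, pvC]
    cases h1 : PySem.Str.startswith (PySem.Str.strip l) "/-!" with
    | true =>
      simp only [h1, if_true]
      cases h2 : (PySem.Str.strip l == "/-!" || PySem.Str.strip l == "/-! " || PySem.Str.strip l == "/-!#") with
      | true => simp [h2, ih]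
      | false =>
        simp only [h2, Bool.false_eq_true, if_false, Bool.not_false, if_true, List.singleton_append]
        generalize PySem.Str.strip (PySem.Str.slice (PySem.Str.strip l) (some 3) none) = P
        cases h3 : (P == "" || PySem.Str.startswith P "#" || PySem.Str.startswith P "*") with
        | true =>
          simp only [pvProseA, h3, if_true]
          simp [ih]
        | false =>
          simp only [pvProseA, h3, Bool.false_eq_true, if_false, List.nil_append]
          rw [pvProseA_ne (pvC rest) [P] (by simp)]
          simp [pvGoB_two]
    | false =>
      simp only [h1, Bool.false_eq_true, if_false]
      cases h2 : (PySem.Str.strip l == "-/") with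
      | true => simp [h2, pvProseA]
      | false =>
        simp only [h2, Bool.false_eq_true, if_false]
        generalize PySem.Str.strip l = P
        cases h3 : (P == "" || PySem.Str.startswith P "#" || PySem.Str.startswith P "*") with
        | true =>
          simp only [pvProseA, h3, if_true]
          simp [ih]
        | false =>
          simp only [pvProseA, h3, Bool.false_eq_true, if_false, List.nil_append]
          rw [pvProseA_ne (pvC rest) [P] (by simp)]
          simp [pvGoB_two]

-- mode 0: B equals A's two staged passes
lemma pvGoB_zero (ls : List String) :
    pvGoB ls 0 [] = pvProseA (pvLoopA ls false []) [] := by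
  induction ls with
  | nil => simp [pvGoB, pvLoopA, pvProseA]
  | cons l rest ih =>
    simp only [pvGoB, pvLoopA]
    cases h1 : PySem.Str.startswith (PySem.Str.strip l) "/-!" with
    | true =>
      simp only [h1, if_true]
      cases h2 : (PySem.Str.strip l == "/-!" || PySem.Str.strip l == "/-! " || PySem.Str.strip l == "/-!#") with
      | true => simp [h2, pvGoB_one, pvLoopA_true]
      | false =>
        simp only [h2, Bool.false_eq_true, if_false, Bool.not_false, if_true]
        rw [pvLoopA_true, List.nil_append, List.singleton_append]
        generalize PySem.Str.strip (PySem.Str.slice (PySem.Str.strip l) (some 3) none) = P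
        cases h3 : (P == "" || PySem.Str.startswith P "#" || PySem.Str.startswith P "*") with
        | true =>
          simp only [pvProseA, h3, if_true]
          simp [pvGoB_one]
        | false =>
          simp only [pvProseA, h3, Bool.false_eq_true, if_false, List.nil_append]
          rw [pvProseA_ne (pvC rest) [P] (by simp)]
          simp [pvGoB_two]
    | false =>
      simp only [h1, Bool.false_eq_true, if_false]
      cases h2 : (PySem.Str.strip l == "-/") <;> simp [h2, ih]

-- ===== VERDICT (by name: the statement is the Claim_ definition above) =====
theorem extract_module_summary_spec : Claim_equal_extract_module_summary := by
  intro lines _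
  simp only [Spec_extract_module_summary, extract_module_summary, extract_module_summary_alt]
  rw [pvGoB_zero]
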